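-- pv_equiv track=rewrite | github.com/threealgos/quantum-key-seeking | RegeV_Algorithm_Edition_Guppy_v146.py | bb_correction
-- ===== SOURCE A (Python) =====
-- import math
--
-- def bb_correction(measurements: list, order: int):
--     best = 0
--     max_score = 0
--     for cand in set(measurements):
--         score = sum(1 for m in measurements if math.gcd(m - cand, order) == 1)
--         if score > max_score:
--             max_score = score
--             best = cand
--     return best
-- ===== SOURCE B (Python) =====
-- from math import gcd
--
-- def bb_correction(measurements: list, order: int):
--     o = abs(order)
--     # residue-frequency table mod |order| (o == 0: the raw values)
--     cnt = {}
--     for m in measurements: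
--         k = m % o if o else m
--         cnt[k] = cnt.get(k, 0) + 1
--     # one score per residue class, by correlating residue pairs
--     score = {r: sum(c for q, c in cnt.items() if gcd(q - r, o) == 1) for r in cnt}
--     best = 0
--     mx = 0
--     for cand in sorted(set(measurements)):
--         s = score[cand % o if o else cand]
--         if s > mx:
--             best = cand
--             mx = s
--     return best
-- ===== Notes on version B (the rewrite author's own statement) =====
-- stated objective: alternative
-- what changed: Instead of rescanning all N measurements for each of the U distinct candidates, B builds a residue-frequency table mod |order| once, computes one coprime-score per residue class by correlating residue pairs, and picks the best candidate by a table lookup per candidate, iterating candidates in sorted order; Pre_ excludes inputs where the positive maximal score is tied between distinct candidates, since there A's answer is an accident of CPython's set iteration order.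
-- outside the precondition, e.g. on bb_correction([28, 4, 15], 7): A returns 28, B returns 4
import Mathlib
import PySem

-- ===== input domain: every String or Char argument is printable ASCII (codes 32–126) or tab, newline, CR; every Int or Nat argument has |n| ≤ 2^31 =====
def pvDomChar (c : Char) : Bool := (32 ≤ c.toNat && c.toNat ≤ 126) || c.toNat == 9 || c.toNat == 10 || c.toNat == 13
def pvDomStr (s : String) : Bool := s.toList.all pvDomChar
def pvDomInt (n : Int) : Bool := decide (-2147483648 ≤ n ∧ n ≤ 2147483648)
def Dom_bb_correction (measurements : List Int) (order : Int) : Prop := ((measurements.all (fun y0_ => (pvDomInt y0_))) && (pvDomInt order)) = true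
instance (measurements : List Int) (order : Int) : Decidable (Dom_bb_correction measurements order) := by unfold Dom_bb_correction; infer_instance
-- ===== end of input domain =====

-- B replaces A's per-candidate rescan of all measurements by a residue-frequency
-- table mod |order| plus one precomputed score per residue class, and scans the
-- candidates in sorted order with a table lookup each (alternative algorithm).

-- ===== PORT A =====
-- A iterates `set(measurements)`; PySem does not model CPython's hash iteration
-- order, so the port iterates the distinct elements in first-occurrence order
-- (PySem.Set.ofList). Under Pre_ below (the maximal score, if positive, is attained
-- by exactly one candidate) A's result is independent of that order.
def bb_correction (measurements : List Int) (order : Int) : Int :=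
  ((PySem.Set.ofList measurements).foldl
    (fun (bm : Int × Int) cand =>
      let score := measurements.foldl
        (fun acc m => if Int.gcd (m - cand) order = 1 then acc + 1 else acc) (0 : Int)
      if score > bm.2 then (cand, score) else bm)
    ((0 : Int), (0 : Int))).1

-- ===== PORT B =====
def bb_correction_alt (measurements : List Int) (order : Int) : Int :=
  let o : Int := |order|
  let cnt : PySem.Dict Int Int := measurements.foldl
    (fun d m =>
      let k := if o ≠ 0 then PySem.Int.mod m o else m
      d.insert k (d.getD k 0 + 1)) PySem.Dict.empty
  -- dict comprehension over cnt's keys in insertion order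
  let score : PySem.Dict Int Int := cnt.keys.foldl
    (fun d r =>
      d.insert r (cnt.items.foldl
        (fun acc qc => if Int.gcd (qc.1 - r) o = 1 then acc + qc.2 else acc) (0 : Int)))
    PySem.Dict.empty
  (((PySem.List.sorted (PySem.Set.ofList measurements) (fun x => x) false).foldl
    (fun (bm : Int × Int) cand =>
      -- score[k]: the key is always present (cand ∈ measurements), so getD is exact
      let s := score.getD (if o ≠ 0 then PySem.Int.mod cand o else cand) 0
      if s > bm.2 then (cand, s) else bm)
    ((0 : Int), (0 : Int))).1)

-- ===== PRECONDITION & SPEC =====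
-- the coprime-score of candidate c: |{m ∈ measurements : gcd(m-c, order) = 1}|
def pvScore (measurements : List Int) (order c : Int) : Int :=
  ((measurements.countP fun m => decide (Int.gcd (m - c) order = 1) : Nat) : Int)

-- Pre_ excludes inputs on which two distinct candidates attain the same positive
-- maximal score: there A's answer is an accident of CPython's set iteration order
-- (not modelled by PySem), and B breaks the tie by smallest candidate instead.
def Pre_bb_correction (measurements : List Int) (order : Int) : Prop :=
  let scores := (PySem.List.dedup measurements).map (pvScore measurements order)
  scores.foldl max 0 ≤ 0 ∨ scores.count (scores.foldl max 0) = 1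
instance (measurements : List Int) (order : Int) : Decidable (Pre_bb_correction measurements order) := by unfold Pre_bb_correction; infer_instance

def pvWitness_bb_correction : List Int × Int := ([0, 1, 1], 2)

def Spec_bb_correction (measurements : List Int) (order : Int) (out : Int) : Prop := out = bb_correction_alt measurements order
instance (measurements : List Int) (order : Int) (out : Int) : Decidable (Spec_bb_correction measurements order out) := by unfold Spec_bb_correction; infer_instance

-- ===== CLAIM (what is proved, stated in full; the proofs are below) =====
def Claim_equal_bb_correction : Prop := ∀ (measurements : List Int) (order : Int), Dom_bb_correction measurements order → Pre_bb_correction measurements order → Spec_bb_correction measurements order (bb_correction measurements order)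

-- ===== LEMMAS AND PROOFS =====

-- named pieces of the two ports (definitionally equal to the inlined code)
def pvKey (o m : Int) : Int := if o ≠ 0 then PySem.Int.mod m o else m

def pvCnt (ms : List Int) (o : Int) : PySem.Dict Int Int :=
  ms.foldl (fun d m =>
    let k := pvKey o m
    d.insert k (d.getD k 0 + 1)) PySem.Dict.empty

def pvScoreB (ms : List Int) (o r : Int) : Int :=
  (pvCnt ms o).items.foldl
    (fun acc qc => if Int.gcd (qc.1 - r) o = 1 then acc + qc.2 else acc) 0

def pvScoreDict (ms : List Int) (o : Int) : PySem.Dict Int Int :=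
  (pvCnt ms o).keys.foldl
    (fun d r => d.insert r (pvScoreB ms o r)) PySem.Dict.empty

def pvScoreA (ms : List Int) (order c : Int) : Int :=
  ms.foldl (fun acc m => if Int.gcd (m - c) order = 1 then acc + 1 else acc) 0

-- the selection step, abstracted over the score function
def pvStep (f : Int → Int) : Int × Int → Int → Int × Int :=
  fun bm cand => if f cand > bm.2 then (cand, f cand) else bm

lemma pv_A_eq (ms : List Int) (order : Int) :
    bb_correction ms order
      = ((PySem.Set.ofList ms).foldl (pvStep (pvScoreA ms order)) (0, 0)).1 := rfl

lemma pv_B_eq (ms : List Int) (order : Int) :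
    bb_correction_alt ms order
      = (((PySem.List.sorted (PySem.Set.ofList ms) (fun x => x) false).foldl
          (pvStep (fun c => (pvScoreDict ms |order|).getD (pvKey |order| c) 0)) (0, 0)).1) := rfl

-- the gcd test only depends on the residue class mod |order|
lemma pv_gcd_key (order m c : Int) :
    Int.gcd (m - c) order = Int.gcd (pvKey |order| m - pvKey |order| c) |order| := by
  by_cases h : order = 0
  · subst h; simp [pvKey]
  · have ho : (0:Int) < |order| := abs_pos.mpr h
    have hno : (|order| : Int) ≠ 0 := ne_of_gt ho
    simp only [pvKey, if_pos hno]
    rw [PySem.Int.mod_eq_emod_of_pos ho, PySem.Int.mod_eq_emod_of_pos ho]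
    have h1 : Int.gcd (m - c) order = Int.gcd (m - c) |order| := by
      unfold Int.gcd
      rw [Int.natAbs_abs]
    have h2 : m % |order| - c % |order|
        = (m - c) - |order| * (m / |order| - c / |order|) := by
      rw [Int.emod_def, Int.emod_def]; ring
    rw [h1, h2, Int.gcd_sub_mul_left_left]

-- fold an if-add over pairs = sum of indicator·weight
lemma pv_foldl_if_add (l : List (Int × Int)) (P : Int → Prop) [DecidablePred P] :
    l.foldl (fun acc qc => if P qc.1 then acc + qc.2 else acc) 0
      = (l.map (fun qc => if P qc.1 then qc.2 else 0)).sum := by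
  have h : (fun (acc : Int) (qc : Int × Int) => if P qc.1 then acc + qc.2 else acc)
      = fun acc qc => acc + (if P qc.1 then qc.2 else 0) := by
    funext acc qc; split <;> simp
  rw [h, PySem.List.foldl_add, zero_add]

lemma pv_indicator_sum (S : List Int) (hS : S.Nodup) (x : Int) (hx : x ∈ S) (g : Int → Int) :
    (S.map (fun k => if k = x then g k else 0)).sum = g x := by
  induction S with
  | nil => cases hx
  | cons a S ih =>
    have hs := List.nodup_cons.mp hS
    simp only [List.map_cons, List.sum_cons]
    rcases List.mem_cons.mp hx with h | hx'
    · subst h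
      rw [if_pos rfl]
      have hz : (S.map (fun k => if k = x then g k else 0)).sum = 0 := by
        apply List.sum_eq_zero
        intro y hy
        obtain ⟨k, hk, hke⟩ := List.mem_map.mp hy
        rw [← hke]
        exact if_neg (fun (e : k = x) => hs.1 (e ▸ hk))
      rw [hz, add_zero]
    · rw [if_neg (by rintro rfl; exact hs.1 hx'), zero_add, ih hs.2 hx']

-- summing indicator·multiplicity over the distinct values = summing the indicator over the list
lemma pv_group_sum (xs : List Int) (S : List Int) (hS : S.Nodup)
    (hcov : ∀ x ∈ xs, x ∈ S) (P : Int → Prop) [DecidablePred P] :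
    (S.map (fun k => if P k then (xs.count k : Int) else 0)).sum
      = (xs.map (fun m => if P m then (1 : Int) else 0)).sum := by
  induction xs with
  | nil => simp
  | cons m xs ih =>
    have hcov' : ∀ x ∈ xs, x ∈ S := fun x hx => hcov x (List.mem_cons_of_mem _ hx)
    have hm : m ∈ S := hcov m List.mem_cons_self
    have hfun : (fun k => if P k then (List.count k (m :: xs) : Int) else 0)
        = fun k => (if P k then (List.count k xs : Int) else 0)
            + (if k = m then (if P k then (1:Int) else 0) else 0) := by
      funext k
      rw [List.count_cons]
      by_cases hkm : k = m
      · subst hkm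
        by_cases hpk : P k
        · simp only [beq_self_eq_true, if_pos hpk]
          push_cast; ring
        · simp [hpk]
      · have hmk : (m == k) = false := beq_eq_false_iff_ne.mpr (fun e => hkm e.symm)
        simp [hmk, hkm]
    rw [hfun, List.sum_map_add, ih hcov',
      pv_indicator_sum S hS m hm (fun k => if P k then (1:Int) else 0)]
    simp [add_comm]

lemma pv_scoreA_sum (ms : List Int) (order c : Int) :
    pvScoreA ms order c
      = (ms.map (fun m => if Int.gcd (m - c) order = 1 then (1 : Int) else 0)).sum := by
  unfold pvScoreA
  have h : (fun (acc m : Int) => if Int.gcd (m - c) order = 1 then acc + 1 else acc)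
      = fun acc m => acc + (if Int.gcd (m - c) order = 1 then (1:Int) else 0) := by
    funext acc m; split <;> simp
  rw [h, PySem.List.foldl_add, zero_add]

lemma pv_cnt_eq (ms : List Int) (o : Int) :
    pvCnt ms o = PySem.Dict.counter (ms.map (pvKey o)) := by
  unfold pvCnt
  rw [← PySem.Dict.foldl_insert_getD_add_one_eq_counter, List.foldl_map]

-- B's per-residue score equals A's per-candidate rescan
lemma pv_score_eq (ms : List Int) (order c : Int) :
    pvScoreB ms |order| (pvKey |order| c) = pvScoreA ms order c := by
  unfold pvScoreB
  rw [pv_cnt_eq, PySem.Dict.items_counter,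
    pv_foldl_if_add _ (fun q => Int.gcd (q - pvKey |order| c) |order| = 1), List.map_map]
  have hcomp : ((fun qc : Int × Int =>
        if Int.gcd (qc.1 - pvKey |order| c) |order| = 1 then qc.2 else 0)
        ∘ (fun k => (k, (List.count k (ms.map (pvKey |order|)) : Int))))
      = fun k => if Int.gcd (k - pvKey |order| c) |order| = 1
          then (List.count k (ms.map (pvKey |order|)) : Int) else 0 := rfl
  rw [hcomp,
    pv_group_sum (ms.map (pvKey |order|)) _ (PySem.Set.nodup_ofList _)
      (fun x hx => (PySem.Set.mem_ofList _ _).mpr hx)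
      (fun q => Int.gcd (q - pvKey |order| c) |order| = 1),
    List.map_map, pv_scoreA_sum]
  apply congrArg
  apply List.map_congr_left
  intro m _
  show (if Int.gcd (pvKey |order| m - pvKey |order| c) |order| = 1 then (1:Int) else 0)
      = (if Int.gcd (m - c) order = 1 then (1:Int) else 0)
  rw [← pv_gcd_key]

-- the score dict built by inserting g r at each r of a list returns g r on its members
lemma pv_getD_foldl_insert_not_mem (l : List Int) (g : Int → Int)
    (d : PySem.Dict Int Int) (r : Int) (hr : r ∉ l) :
    (l.foldl (fun d x => d.insert x (g x)) d).getD r 0 = d.getD r 0 := by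
  induction l generalizing d with
  | nil => rfl
  | cons a l ih =>
    have hra : r ≠ a := fun e => hr (e ▸ List.mem_cons_self)
    rw [List.foldl_cons, ih _ (fun h => hr (List.mem_cons_of_mem _ h)),
      PySem.Dict.getD_insert, if_neg hra]

lemma pv_getD_foldl_insert_mem (l : List Int) (g : Int → Int)
    (d : PySem.Dict Int Int) (r : Int) (hr : r ∈ l) :
    (l.foldl (fun d x => d.insert x (g x)) d).getD r 0 = g r := by
  induction l generalizing d with
  | nil => cases hr
  | cons a l ih =>
    rw [List.foldl_cons]
    by_cases h : r ∈ l
    · exact ih _ h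
    · have hra : r = a := by
        rcases List.mem_cons.mp hr with h1 | h2
        · exact h1
        · exact absurd h2 h
      subst hra
      rw [pv_getD_foldl_insert_not_mem _ _ _ _ h, PySem.Dict.getD_insert, if_pos rfl]

lemma pv_lookup_eq (ms : List Int) (order c : Int) (hc : c ∈ ms) :
    (pvScoreDict ms |order|).getD (pvKey |order| c) 0 = pvScoreA ms order c := by
  unfold pvScoreDict
  have hmem : pvKey |order| c ∈ (pvCnt ms |order|).keys := by
    rw [pv_cnt_eq, PySem.Dict.keys_counter, PySem.Set.mem_ofList]
    exact List.mem_map_of_mem hc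
  rw [pv_getD_foldl_insert_mem _ _ _ _ hmem, pv_score_eq]

-- on candidates drawn from ms, B's table-lookup fold is A's rescan fold
lemma pv_foldL_eq_foldA (ms : List Int) (order : Int) (cs : List Int)
    (hcs : ∀ c ∈ cs, c ∈ ms) (b mx : Int) :
    cs.foldl (pvStep (fun c => (pvScoreDict ms |order|).getD (pvKey |order| c) 0)) (b, mx)
      = cs.foldl (pvStep (pvScoreA ms order)) (b, mx) := by
  induction cs generalizing b mx with
  | nil => rfl
  | cons c cs ih =>
    have hc : c ∈ ms := hcs c List.mem_cons_self
    have hcs' : ∀ x ∈ cs, x ∈ ms := fun x hx => hcs x (List.mem_cons_of_mem _ hx)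
    simp only [List.foldl_cons]
    have hstep :
        pvStep (fun c => (pvScoreDict ms |order|).getD (pvKey |order| c) 0) (b, mx) c
          = pvStep (pvScoreA ms order) (b, mx) c := by
      simp only [pvStep, pv_lookup_eq ms order c hc]
    rw [hstep]
    exact ih hcs' _ _

-- — the argmax argument: with a unique positive maximum, any candidate order gives it —

-- the fold never moves once every remaining score is bounded by the threshold
lemma pv_fold_stall (f : Int → Int) (cs : List Int) (b mx : Int)
    (h : ∀ x ∈ cs, f x ≤ mx) : cs.foldl (pvStep f) (b, mx) = (b, mx) := by
  induction cs with
  | nil => rfl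
  | cons c cs ih =>
    have hc : ¬ f c > mx := not_lt.mpr (h c List.mem_cons_self)
    simp only [List.foldl_cons, pvStep, if_neg hc]
    exact ih (fun x hx => h x (List.mem_cons_of_mem _ hx))

-- the fold locks onto the unique strict maximizer u as soon as the threshold is below f u
lemma pv_fold_lock (f : Int → Int) (u : Int) (cs : List Int) (b mx : Int)
    (hu : u ∈ cs) (hmx : mx < f u) (hlt : ∀ x ∈ cs, x ≠ u → f x < f u) :
    cs.foldl (pvStep f) (b, mx) = (u, f u) := by
  induction cs generalizing b mx with
  | nil => cases hu
  | cons c cs ih =>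
    by_cases hcu : c = u
    · subst hcu
      simp only [List.foldl_cons, pvStep, if_pos hmx]
      exact pv_fold_stall f cs c (f c)
        (fun x hx => by
          by_cases hxc : x = c
          · exact hxc ▸ le_refl _
          · exact le_of_lt (hlt x (List.mem_cons_of_mem _ hx) hxc))
    · have hu' : u ∈ cs := by
        rcases List.mem_cons.mp hu with h1 | h2
        · exact absurd h1.symm hcu
        · exact h2
      have hlt' : ∀ x ∈ cs, x ≠ u → f x < f u :=
        fun x hx => hlt x (List.mem_cons_of_mem _ hx)
      have hcv : f c < f u := hlt c List.mem_cons_self hcu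
      simp only [List.foldl_cons, pvStep]
      by_cases hgt : f c > mx
      · rw [if_pos hgt]; exact ih _ _ hu' hcv hlt'
      · rw [if_neg hgt]; exact ih _ _ hu' hmx hlt'

-- a nonempty list has a member with maximal score
lemma pv_exists_max (f : Int → Int) (l : List Int) (hne : l ≠ []) :
    ∃ u ∈ l, ∀ x ∈ l, f x ≤ f u := by
  induction l with
  | nil => exact absurd rfl hne
  | cons a l ih =>
    by_cases h : l = []
    · subst h
      exact ⟨a, List.mem_cons_self, fun x hx => by
        rcases List.mem_cons.mp hx with h1 | h2
        · exact h1 ▸ le_refl _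
        · cases h2⟩
    · obtain ⟨u, hu, hmax⟩ := ih h
      by_cases hau : f a ≤ f u
      · exact ⟨u, List.mem_cons_of_mem _ hu, fun x hx => by
          rcases List.mem_cons.mp hx with h1 | h2
          · exact h1 ▸ hau
          · exact hmax x h2⟩
      · exact ⟨a, List.mem_cons_self, fun x hx => by
          rcases List.mem_cons.mp hx with h1 | h2
          · exact h1 ▸ le_refl _
          · exact le_of_lt (lt_of_le_of_lt (hmax x h2) (not_le.mp hau))⟩

-- an upper bound on every element and on the seed bounds the running maximum
lemma pv_foldl_max_le (l : List Int) (a b : Int) (ha : a ≤ b) (h : ∀ x ∈ l, x ≤ b) :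
    l.foldl max a ≤ b := by
  induction l generalizing a with
  | nil => exact ha
  | cons c t ih =>
    exact ih _ (max_le ha (h c List.mem_cons_self))
      (fun x hx => h x (List.mem_cons_of_mem _ hx))

-- two distinct positions with value M give count ≥ 2
lemma pv_count_two (l : List Int) (g : Int → Int) (M : Int) (hnd : l.Nodup)
    (u x : Int) (hu : u ∈ l) (hx : x ∈ l) (hne : x ≠ u)
    (hgu : g u = M) (hgx : g x = M) : 2 ≤ (l.map g).count M := by
  induction l with
  | nil => cases hu
  | cons a t ih =>
    have hnd' := List.nodup_cons.mp hnd
    rw [List.map_cons, List.count_cons]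
    by_cases hua : u = a
    · have hxt : x ∈ t := by
        rcases List.mem_cons.mp hx with h1 | h2
        · exact absurd (h1.trans hua.symm) hne
        · exact h2
      have h1 : 0 < (t.map g).count M :=
        List.count_pos_iff.mpr (hgx ▸ List.mem_map_of_mem hxt)
      have h2 : (g a == M) = true := by rw [← hua, hgu]; simp
      simp only [h2, if_true]
      omega
    · by_cases hxa : x = a
      · have hut : u ∈ t := by
          rcases List.mem_cons.mp hu with h1 | h2
          · exact absurd h1 hua
          · exact h2
        have h1 : 0 < (t.map g).count M :=
          List.count_pos_iff.mpr (hgu ▸ List.mem_map_of_mem hut)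
        have h2 : (g a == M) = true := by rw [← hxa, hgx]; simp
        simp only [h2, if_true]
        omega
      · have hut : u ∈ t := by
          rcases List.mem_cons.mp hu with h1 | h2
          · exact absurd h1 hua
          · exact h2
        have hxt : x ∈ t := by
          rcases List.mem_cons.mp hx with h1 | h2
          · exact absurd h1 hxa
          · exact h2
        have := ih hnd'.2 hut hxt
        split <;> omega

-- Pre_'s score is the port-level score
lemma pv_score_eq_scoreA (ms : List Int) (order c : Int) :
    pvScore ms order c = pvScoreA ms order c := by
  rw [pvScore, pv_scoreA_sum, ← PySem.List.sum_map_ite_one_zero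
    (fun m => decide (Int.gcd (m - c) order = 1)) ms]
  apply congrArg
  apply List.map_congr_left
  intro m _
  simp

-- ===== VERDICT (by name: the statement is the Claim_ definition above) =====
theorem bb_correction_spec : Claim_equal_bb_correction := by
  intro ms order _ hpre
  rw [Pre_bb_correction] at hpre
  show bb_correction ms order = bb_correction_alt ms order
  rw [pv_A_eq, pv_B_eq,
    pv_foldL_eq_foldA ms order _
      (fun c hc => (PySem.Set.mem_ofList _ _).mp ((PySem.List.mem_sorted _ _ _ _).mp hc)) 0 0]
  set f := pvScoreA ms order with hf
  set l1 := PySem.Set.ofList ms with hl1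
  set l2 := PySem.List.sorted l1 (fun x => x) false with hl2
  have hmem12 : ∀ x, x ∈ l2 ↔ x ∈ l1 := fun x => PySem.List.mem_sorted _ _ _ _
  by_cases hpos : ∃ x ∈ l1, 0 < f x
  · -- positive maximum: Pre_ makes its attainer unique, both folds lock onto it
    obtain ⟨x0, hx0, hx0pos⟩ := hpos
    obtain ⟨u, hu, hmax⟩ := pv_exists_max f l1 (List.ne_nil_of_mem hx0)
    have hupos : 0 < f u := lt_of_lt_of_le hx0pos (hmax x0 hx0)
    have hscores : (PySem.List.dedup ms).map (pvScore ms order) = l1.map f := by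
      rw [hl1, PySem.List.dedup_eq_ofList]
      exact List.map_congr_left (fun c _ => pv_score_eq_scoreA ms order c)
    have hfuM : (l1.map f).foldl max 0 = f u := by
      apply le_antisymm
      · exact pv_foldl_max_le _ _ _ (le_of_lt hupos)
          (fun x hx => by
            obtain ⟨c, hc, hce⟩ := List.mem_map.mp hx
            exact hce ▸ hmax c hc)
      · exact (PySem.List.le_foldl_max (l1.map f) 0).2 (f u) (List.mem_map_of_mem hu)
    have hcount : (l1.map f).count (f u) = 1 := by
      rcases hpre with hle | hc
      · rw [hscores, hfuM] at hle
        exact absurd hle (not_le.mpr hupos)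
      · rw [hscores, hfuM] at hc
        exact hc
    have huniq : ∀ x ∈ l1, f x = f u → x = u := by
      intro x hx hfx
      by_contra hne
      have h2 := pv_count_two l1 f (f u) (PySem.Set.nodup_ofList ms) u x hu hx hne rfl hfx
      omega
    have hlt1 : ∀ x ∈ l1, x ≠ u → f x < f u :=
      fun x hx hne => lt_of_le_of_ne (hmax x hx) (fun e => hne (huniq x hx e))
    rw [pv_fold_lock f u l1 0 0 hu hupos hlt1,
      pv_fold_lock f u l2 0 0 ((hmem12 u).mpr hu)
        hupos (fun x hx => hlt1 x ((hmem12 x).mp hx))]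
  · -- every score is 0: neither fold moves off (0, 0)
    have hz : ∀ x ∈ l1, f x ≤ 0 := by
      intro x hx
      exact not_lt.mp (fun h => hpos ⟨x, hx, h⟩)
    rw [pv_fold_stall f l1 0 0 hz,
      pv_fold_stall f l2 0 0 (fun x hx => hz x ((hmem12 x).mp hx))]
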